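-- pv_equiv track=rewrite | github.com/think-chao/interview | 动态规划/pack.py | pack_one
-- ===== SOURCE A (Python) =====
-- def pack_one(weights, size):
--     """
--     :param weights: n items with size weights[i]
--     :param size:    how many weight can the pack holds
--     :return:        the max value
--     """
--     # dp[i][j] 表示背包容量为j的时候，前i个物品能达到的最大重量
--     #
--     dp = [[0] * (size + 1) for _ in range(len(weights)+1)]
--     for i in range(1, len(weights) + 1):
--         for j in range(1, size + 1):
--             # 如果当前放不下
--             if j < weights[i - 1]:
--                 dp[i][j] = dp[i - 1][j]
--             else:
--                 dp[i][j] = max(dp[i - 1][j - weights[i - 1]] + weights[i - 1], dp[i - 1][j])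
--     return dp[-1][-1]
-- ===== SOURCE B (Python) =====
-- def pack_one(weights, size):
--     """
--     :param weights: n items with size weights[i]
--     :param size:    how many weight can the pack holds
--     :return:        the max value
--     """
--     # Track the set of achievable subset sums (capped at size) instead of a DP grid.
--     reachable = {0}
--     for w in weights:
--         reachable |= {s + w for s in reachable if s + w <= size}
--     return max(reachable)
-- ===== Notes on version B (the rewrite author's own statement) =====
-- stated objective: faster
-- what changed: Replaces the (n+1)x(size+1) bottom-up DP table with a single pass that maintains the set of reachable subset sums capped at the capacity and returns its maximum.
import Mathlib
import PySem

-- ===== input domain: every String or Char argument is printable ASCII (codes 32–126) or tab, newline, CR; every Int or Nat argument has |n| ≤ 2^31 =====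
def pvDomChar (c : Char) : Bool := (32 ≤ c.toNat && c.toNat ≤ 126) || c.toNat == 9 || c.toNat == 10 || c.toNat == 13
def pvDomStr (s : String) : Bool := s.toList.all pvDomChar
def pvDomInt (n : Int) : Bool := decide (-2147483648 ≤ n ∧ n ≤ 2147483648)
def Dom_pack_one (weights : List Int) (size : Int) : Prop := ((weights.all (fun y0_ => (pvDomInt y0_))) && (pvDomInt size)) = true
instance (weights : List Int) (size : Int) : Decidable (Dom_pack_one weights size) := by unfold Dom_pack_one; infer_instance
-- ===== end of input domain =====

-- B replaces A's (n+1)×(size+1) bottom-up DP table by a single pass maintaining the set of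
-- reachable subset sums capped at the capacity (measured much faster: the set holds only the
-- distinct reachable sums instead of one cell per capacity value).

-- ===== PORT A =====
-- dp[i][j] read with a default (always in range on Pre_-admitted inputs)
def pvGet2 (dp : List (List Int)) (i j : Int) : Int :=
  PySem.List.pyGetD (PySem.List.pyGetD dp i []) j 0

-- dp[i][j] = v
def pvSet2 (dp : List (List Int)) (i j : Int) (v : Int) : List (List Int) :=
  PySem.List.pySetD dp i (PySem.List.pySetD (PySem.List.pyGetD dp i []) j v)

def pack_one (weights : List Int) (size : Int) : Int :=
  let n : Int := weights.length
  -- dp = [[0] * (size + 1) for _ in range(len(weights)+1)]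
  let dp0 : List (List Int) :=
    (PySem.List.pyRange 0 (n + 1) 1).map (fun _ => List.replicate (size + 1).toNat (0 : Int))
  -- the two nested for-loops, mutating dp
  let dp := (PySem.List.pyRange 1 (n + 1) 1).foldl (fun dp i =>
    (PySem.List.pyRange 1 (size + 1) 1).foldl (fun dp j =>
      let w := PySem.List.pyGetD weights (i - 1) 0
      if j < w then
        pvSet2 dp i j (pvGet2 dp (i - 1) j)
      else
        pvSet2 dp i j (max (pvGet2 dp (i - 1) (j - w) + w) (pvGet2 dp (i - 1) j))) dp) dp0
  -- return dp[-1][-1]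
  pvGet2 dp (-1) (-1)

-- ===== PORT B =====
def pack_one_alt (weights : List Int) (size : Int) : Int :=
  -- reachable = {0}
  let reachable : PySem.Set Int := PySem.Set.ofList [0]
  -- for w in weights: reachable |= {s + w for s in reachable if s + w <= size}
  let r := weights.foldl (fun (r : PySem.Set Int) w =>
    PySem.Set.union r ((r.filter (fun s => decide (s + w ≤ size))).map (fun s => s + w))) reachable
  -- return max(reachable)
  ((PySem.List.max? r (fun x => x)).getD 0)

-- ===== PRECONDITION & SPEC =====
-- Pre_ excludes exactly the inputs on which A raises IndexError: a negative capacity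
-- (dp rows are empty, so dp[-1][-1] fails), or a negative weight together with size ≥ 1
-- (dp[i-1][j - w] is indexed past the end of the row).
def Pre_pack_one (weights : List Int) (size : Int) : Prop :=
  0 ≤ size ∧ (size = 0 ∨ ∀ w ∈ weights, 0 ≤ w)
instance (weights : List Int) (size : Int) : Decidable (Pre_pack_one weights size) := by
  unfold Pre_pack_one; infer_instance

def pvWitness_pack_one : List Int × Int := ([2, 3, 4], 5)

def Spec_pack_one (weights : List Int) (size : Int) (out : Int) : Prop := out = pack_one_alt weights size
instance (weights : List Int) (size : Int) (out : Int) : Decidable (Spec_pack_one weights size out) := by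
  unfold Spec_pack_one; infer_instance

-- ===== CLAIM (what is proved, stated in full; the proofs are below) =====
def Claim_equal_pack_one : Prop := ∀ (weights : List Int) (size : Int), Dom_pack_one weights size → Pre_pack_one weights size → Spec_pack_one weights size (pack_one weights size)

-- ===== LEMMAS AND PROOFS =====

-- The shared recurrence: pvRow ws j is A's dp-row value at capacity j for the items ws,
-- written exactly as A's row update reads it.
def pvStep (f : Int → Int) (w : Int) : Int → Int :=
  fun j => if j < w then f j else max (f (j - w) + w) (f j)

def pvRow (ws : List Int) : Int → Int :=
  ws.foldl pvStep (fun _ => 0)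

-- max of the elements of l that are ≤ j, at least 0
def pvMF (l : List Int) (j : Int) : Int :=
  (l.filter (fun s => decide (s ≤ j))).foldl max 0

lemma pvRow_zero_aux (ws : List Int) : ∀ (f : Int → Int), (∀ w ∈ ws, 0 ≤ w) → f 0 = 0 →
    (ws.foldl pvStep f) 0 = 0 := by
  induction ws with
  | nil => intro f _ h0; simpa [pvRow] using h0
  | cons w t ih =>
    intro f hw h0
    simp only [List.foldl_cons]
    apply ih _ (fun x hx => hw x (List.mem_cons_of_mem _ hx))
    have hw0 : 0 ≤ w := hw w List.mem_cons_self
    simp only [pvStep]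
    rcases lt_or_eq_of_le hw0 with h | h
    · simp [h, h0]
    · simp [← h, h0]

lemma maxD_eq (r : List Int) (m : Int) (hm : m ∈ r) (hub : ∀ s ∈ r, s ≤ m) :
    (PySem.List.max? r (fun x => x)).getD 0 = m := by
  cases r with
  | nil => cases hm
  | cons x t =>
    rw [PySem.List.max?_id_cons]
    simp only [Option.getD_some]
    have h1 := PySem.List.le_foldl_max t x
    have h2 := PySem.List.foldl_max_mem t x
    apply le_antisymm
    · rcases h2 with h | h
      · rw [h]; exact hub x List.mem_cons_self
      · exact hub _ (List.mem_cons_of_mem _ h)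
    · rcases List.mem_cons.1 hm with h | h
      · subst h; exact h1.1
      · exact h1.2 m h

def pvBStep (size : Int) (r : PySem.Set Int) (w : Int) : PySem.Set Int :=
  PySem.Set.union r ((r.filter (fun s => decide (s + w ≤ size))).map (fun s => s + w))

lemma mem_pvBStep {size : Int} {r : PySem.Set Int} {w y : Int} :
    y ∈ pvBStep size r w ↔ y ∈ r ∨ ∃ s ∈ r, y = s + w ∧ s + w ≤ size := by
  unfold pvBStep
  rw [PySem.Set.mem_union]
  simp only [List.mem_map, List.mem_filter, decide_eq_true_eq]
  constructor
  · rintro (h | ⟨s, ⟨hs, hle⟩, rfl⟩)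
    · exact Or.inl h
    · exact Or.inr ⟨s, hs, rfl, hle⟩
  · rintro (h | ⟨s, hs, rfl, hle⟩)
    · exact Or.inl h
    · exact Or.inr ⟨s, ⟨hs, hle⟩, rfl⟩

lemma pack_one_size_zero (weights : List Int) : pack_one weights 0 = 0 := by
  unfold pack_one
  rw [PySem.List.pyRange_one_eq_nil (by omega : (0:Int) + 1 ≤ 1)]
  simp only [List.foldl_nil, PySem.List.foldl_ignore]
  have hne : ((PySem.List.pyRange 0 ((weights.length:Int) + 1) 1).map
      (fun _ => List.replicate ((0:Int) + 1).toNat (0 : Int))) ≠ [] := by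
    simp [PySem.List.length_pyRange_one]
  unfold pvGet2
  rw [PySem.List.pyGetD_neg_one _ _ hne]
  have hmem := List.getLast_mem hne
  rw [List.mem_map] at hmem
  obtain ⟨_, _, heq⟩ := hmem
  rw [← heq]
  decide

lemma alt_fold_inv_zero (ws : List Int) : ∀ (r : PySem.Set Int), 0 ∈ r → (∀ s ∈ r, s ≤ 0) →
    0 ∈ ws.foldl (pvBStep 0) r ∧ ∀ s ∈ ws.foldl (pvBStep 0) r, s ≤ 0 := by
  induction ws with
  | nil => intro r h1 h2; exact ⟨h1, h2⟩
  | cons w t ih =>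
    intro r h1 h2
    simp only [List.foldl_cons]
    apply ih
    · exact mem_pvBStep.2 (Or.inl h1)
    · intro s hs
      rcases mem_pvBStep.1 hs with h | ⟨s', _, rfl, hle⟩
      · exact h2 s h
      · exact hle

lemma alt_size_zero (weights : List Int) : pack_one_alt weights 0 = 0 := by
  unfold pack_one_alt
  simp only []
  have : (fun (r : PySem.Set Int) w =>
      PySem.Set.union r ((r.filter (fun s => decide (s + w ≤ (0:Int)))).map (fun s => s + w)))
      = pvBStep 0 := rfl
  rw [this]
  have h := alt_fold_inv_zero weights (PySem.Set.ofList [0]) (by decide) (by decide)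
  exact maxD_eq _ 0 h.1 h.2

lemma pvMF_nonneg (l : List Int) (j : Int) : 0 ≤ pvMF l j :=
  (PySem.List.le_foldl_max _ 0).1

lemma le_pvMF {l : List Int} {j x : Int} (hx : x ∈ l) (hxj : x ≤ j) : x ≤ pvMF l j :=
  (PySem.List.le_foldl_max _ 0).2 x (List.mem_filter.2 ⟨hx, by simpa using hxj⟩)

lemma pvMF_mem_or (l : List Int) (j : Int) : pvMF l j = 0 ∨ (pvMF l j ∈ l ∧ pvMF l j ≤ j) := by
  rcases PySem.List.foldl_max_mem (l.filter (fun s => decide (s ≤ j))) 0 with h | h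
  · exact Or.inl h
  · right
    have := List.mem_filter.1 h
    exact ⟨this.1, by simpa using this.2⟩

lemma pvMF_bstep {size : Int} (r : PySem.Set Int) (w j : Int) (hw : 0 ≤ w) (h0 : 0 ∈ r)
    (hj0 : 0 ≤ j) (hjs : j ≤ size) (hrnn : ∀ s ∈ r, 0 ≤ s) :
    pvMF (pvBStep size r w) j = if j < w then pvMF r j else max (pvMF r (j - w) + w) (pvMF r j) := by
  split_ifs with hlt
  · -- j < w : the new elements are all > j
    apply le_antisymm
    · rcases pvMF_mem_or (pvBStep size r w) j with h | ⟨hm, hle⟩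
      · rw [h]; exact pvMF_nonneg r j
      · rcases mem_pvBStep.1 hm with h | ⟨s, hs, heq, _⟩
        · exact le_pvMF h hle
        · have := hrnn s hs; omega
    · rcases pvMF_mem_or r j with h | ⟨hm, hle⟩
      · rw [h]; exact pvMF_nonneg _ j
      · exact le_pvMF (mem_pvBStep.2 (Or.inl hm)) hle
  · apply le_antisymm
    · rcases pvMF_mem_or (pvBStep size r w) j with h | ⟨hm, hle⟩
      · rw [h]
        have := pvMF_nonneg r j
        omega
      · rcases mem_pvBStep.1 hm with h | ⟨s, hs, heq, _⟩
        · have := le_pvMF h hle; omega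
        · have hs' : s ≤ j - w := by omega
          have := le_pvMF hs hs'
          omega
    · apply max_le
      · rcases pvMF_mem_or r (j - w) with h | ⟨hm, hle⟩
        · rw [h]
          exact le_pvMF (mem_pvBStep.2 (Or.inr ⟨0, h0, by omega, by omega⟩)) (by omega)
        · exact le_pvMF (mem_pvBStep.2 (Or.inr ⟨_, hm, rfl, by omega⟩)) (by omega)
      · rcases pvMF_mem_or r j with h | ⟨hm, hle⟩
        · rw [h]; exact pvMF_nonneg _ j
        · exact le_pvMF (mem_pvBStep.2 (Or.inl hm)) hle

lemma b_fold (size : Int) (ws : List Int) : ∀ (r : PySem.Set Int) (f : Int → Int),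
    (∀ w ∈ ws, 0 ≤ w) → 0 ∈ r → (∀ s ∈ r, 0 ≤ s ∧ s ≤ size) →
    (∀ j, 0 ≤ j → j ≤ size → f j = pvMF r j) →
    (0 ∈ ws.foldl (pvBStep size) r ∧ (∀ s ∈ ws.foldl (pvBStep size) r, 0 ≤ s ∧ s ≤ size) ∧
     ∀ j, 0 ≤ j → j ≤ size → (ws.foldl pvStep f) j = pvMF (ws.foldl (pvBStep size) r) j) := by
  induction ws with
  | nil => intro r f _ h0 hb hf; exact ⟨h0, hb, fun j h1 h2 => hf j h1 h2⟩
  | cons w t ih =>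
    intro r f hw h0 hb hf
    simp only [List.foldl_cons]
    have hw0 : 0 ≤ w := hw w List.mem_cons_self
    apply ih _ _ (fun x hx => hw x (List.mem_cons_of_mem _ hx))
    · exact mem_pvBStep.2 (Or.inl h0)
    · intro s hs
      rcases mem_pvBStep.1 hs with h | ⟨s', hs', rfl, hle⟩
      · exact hb s h
      · exact ⟨by have := (hb s' hs').1; omega, hle⟩
    · intro j hj0 hjs
      rw [pvMF_bstep r w j hw0 h0 hj0 hjs (fun s hs => (hb s hs).1)]
      simp only [pvStep]
      split_ifs with hlt
      · exact hf j hj0 hjs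
      · rw [hf j hj0 hjs, hf (j - w) (by omega) (by omega)]

lemma alt_eq_row (weights : List Int) (size : Int) (h0 : 0 ≤ size)
    (hw : ∀ w ∈ weights, 0 ≤ w) : pack_one_alt weights size = pvRow weights size := by
  unfold pack_one_alt
  simp only []
  have hbs : (fun (r : PySem.Set Int) w =>
      PySem.Set.union r ((r.filter (fun s => decide (s + w ≤ size))).map (fun s => s + w)))
      = pvBStep size := rfl
  rw [hbs]
  have hof : PySem.Set.ofList [(0:Int)] = [0] := rfl
  rw [hof]
  have h := b_fold size weights [0] (fun _ => 0) hw (by simp) (by simp [h0])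
    (by intro j hj0 _; simp [pvMF, hj0])
  obtain ⟨hmem, hbound, heq⟩ := h
  unfold pvRow
  rw [heq size h0 le_rfl]
  apply maxD_eq
  · rcases pvMF_mem_or (weights.foldl (pvBStep size) [0]) size with h | ⟨hm, _⟩
    · rw [h]
      exact hmem
    · exact hm
  · intro s hs
    exact le_pvMF hs (hbound s hs).2

-- ===== A-side =====
def pvZeros (st : Nat) : List Int := List.replicate (st+1) 0
def pvRowL (ws : List Int) (st : Nat) : List Int :=
  (PySem.List.pyRange 0 ((st:Int)+1) 1).map (fun j => pvRow ws j)
def pvTab (weights : List Int) (st i : Nat) : List (List Int) :=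
  (List.range (weights.length+1)).map (fun k => if k ≤ i then pvRowL (weights.take k) st else pvZeros st)
def pvPart (weights : List Int) (st i m : Nat) : List Int :=
  (PySem.List.pyRange 0 ((st:Int)+1) 1).map
    (fun j => if 1 ≤ j ∧ j ≤ (m:Int) then pvRow (weights.take (i+1)) j else 0)

lemma length_pvRowL (ws : List Int) (st : Nat) : (pvRowL ws st).length = st + 1 := by
  simp [pvRowL, PySem.List.length_pyRange_one]

lemma length_pvPart (weights : List Int) (st i m : Nat) :
    (pvPart weights st i m).length = st + 1 := by
  simp [pvPart, PySem.List.length_pyRange_one]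

lemma getElem_pvRowL (ws : List Int) (st k : Nat) (hk : k < st + 1) :
    (pvRowL ws st)[k]'(by rw [length_pvRowL]; omega) = pvRow ws (k : Int) := by
  unfold pvRowL
  rw [List.getElem_map, PySem.List.getElem_pyRange_one]
  norm_num

lemma getElem_pvPart (weights : List Int) (st i m k : Nat) (hk : k < st + 1) :
    (pvPart weights st i m)[k]'(by rw [length_pvPart]; omega)
      = if 1 ≤ (k:Int) ∧ (k:Int) ≤ (m:Int) then pvRow (weights.take (i+1)) (k:Int) else 0 := by
  unfold pvPart
  rw [List.getElem_map, PySem.List.getElem_pyRange_one]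
  norm_num

lemma pvRowL_nil (st : Nat) : pvRowL [] st = pvZeros st := by
  apply List.ext_getElem
  · simp [length_pvRowL, pvZeros]
  · intro k hk1 hk2
    rw [length_pvRowL] at hk1
    rw [getElem_pvRowL _ _ _ hk1]
    simp [pvZeros, pvRow]

lemma pvPart_zero (weights : List Int) (st i : Nat) : pvPart weights st i 0 = pvZeros st := by
  apply List.ext_getElem
  · simp [length_pvPart, pvZeros]
  · intro k hk1 hk2
    rw [length_pvPart] at hk1
    rw [getElem_pvPart _ _ _ _ _ hk1]
    rw [if_neg (by omega)]
    simp [pvZeros]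

lemma pvRow_take_succ (weights : List Int) (i : Nat) (hi : i < weights.length) :
    pvRow (weights.take (i+1)) = pvStep (pvRow (weights.take i)) weights[i] := by
  unfold pvRow
  rw [List.take_add_one, List.getElem?_eq_getElem hi]
  rw [Option.toList_some, List.foldl_append, List.foldl_cons, List.foldl_nil]

lemma length_pvTab (weights : List Int) (st i : Nat) :
    (pvTab weights st i).length = weights.length + 1 := by simp [pvTab]

lemma pvTab_getElem (weights : List Int) (st i k : Nat) (hk : k < weights.length + 1) :
    (pvTab weights st i)[k]'(by rw [length_pvTab]; omega)
      = if k ≤ i then pvRowL (weights.take k) st else pvZeros st := by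
  simp [pvTab]

lemma pyGetD_pvRowL (ws : List Int) (st : Nat) (j : Int) (h1 : 0 ≤ j) (h2 : j ≤ (st:Int)) :
    PySem.List.pyGetD (pvRowL ws st) j 0 = pvRow ws j := by
  rw [PySem.List.pyGetD_eq_getElem _ _ h1 (by rw [length_pvRowL]; push_cast; omega)]
  rw [getElem_pvRowL _ _ _ (by omega), Int.toNat_of_nonneg h1]

lemma pvPart_set (weights : List Int) (st i m : Nat) (hm : m < st) :
    (pvPart weights st i m).set (m+1) (pvRow (weights.take (i+1)) ((m:Int)+1))
      = pvPart weights st i (m+1) := by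
  apply List.ext_getElem
  · simp [length_pvPart]
  · intro k hk1 hk2
    simp only [List.length_set, length_pvPart] at hk1 hk2
    rw [List.getElem_set, getElem_pvPart weights st i (m+1) k hk2]
    by_cases h : k = m+1
    · subst h
      rw [if_pos rfl, if_pos (by omega)]
      push_cast
      ring_nf
    · rw [if_neg (by omega : ¬ m + 1 = k), getElem_pvPart weights st i m k hk2]
      by_cases h2 : 1 ≤ (k:Int) ∧ (k:Int) ≤ (m:Int)
      · rw [if_pos h2, if_pos (by omega)]
      · rw [if_neg h2, if_neg (by omega)]

lemma set_pvZeros_self (weights : List Int) (st i : Nat) (hi : i < weights.length) :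
    (pvTab weights st i).set (i+1) (pvZeros st) = pvTab weights st i := by
  apply List.ext_getElem
  · simp
  · intro k hk1 hk2
    rw [List.getElem_set]
    split_ifs with h
    · subst h
      rw [pvTab_getElem weights st i (i+1) (by rw [length_pvTab] at hk2; omega)]
      rw [if_neg (by omega)]
    · rfl

lemma inner_step (weights : List Int) (st : Nat) (hw : ∀ w ∈ weights, 0 ≤ w)
    (i m : Nat) (hi : i < weights.length) (hm : m < st) :
    (fun (dp : List (List Int)) (j : Int) =>
      let w := PySem.List.pyGetD weights ((1+(i:Int)) - 1) 0
      if j < w then pvSet2 dp (1+(i:Int)) j (pvGet2 dp ((1+(i:Int)) - 1) j)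
      else pvSet2 dp (1+(i:Int)) j
        (max (pvGet2 dp ((1+(i:Int)) - 1) (j - w) + w) (pvGet2 dp ((1+(i:Int)) - 1) j)))
      ((pvTab weights st i).set (i+1) (pvPart weights st i m)) (1+(m:Int))
    = (pvTab weights st i).set (i+1) (pvPart weights st i (m+1)) := by
  have hiw : 0 ≤ weights[i] := hw _ (List.getElem_mem hi)
  have hidx : (1+(i:Int)) - 1 = ((i:Nat):Int) := by omega
  have hgetw : PySem.List.pyGetD weights ((1+(i:Int)) - 1) 0 = weights[i] := by
    rw [hidx, PySem.List.pyGetD_natCast, List.getD_eq_getElem _ _ hi]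
  set acc := (pvTab weights st i).set (i+1) (pvPart weights st i m) with hacc
  have hrowprev : PySem.List.pyGetD acc ((1+(i:Int)) - 1) [] = pvRowL (weights.take i) st := by
    rw [hidx, PySem.List.pyGetD_natCast, hacc]
    rw [List.getD_eq_getElem _ _ (by rw [List.length_set, length_pvTab]; omega)]
    rw [List.getElem_set_ne (by omega)]
    rw [pvTab_getElem weights st i i (by omega), if_pos le_rfl]
  have hread : ∀ j : Int, 0 ≤ j → j ≤ (st:Int) →
      pvGet2 acc ((1+(i:Int)) - 1) j = pvRow (weights.take i) j := by
    intro j h1 h2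
    unfold pvGet2
    rw [hrowprev, pyGetD_pvRowL _ _ _ h1 h2]
  have hrowcur : PySem.List.pyGetD acc (1+(i:Int)) [] = pvPart weights st i m := by
    have h1 : (1+(i:Int)) = (((i+1) : Nat) : Int) := by push_cast; omega
    rw [h1, PySem.List.pyGetD_natCast, hacc]
    rw [List.getD_eq_getElem _ _ (by rw [List.length_set, length_pvTab]; omega)]
    rw [List.getElem_set_self (by rw [List.length_set, length_pvTab]; omega)]
  have hwrite : ∀ v : Int, v = pvRow (weights.take (i+1)) ((m:Int)+1) →
      pvSet2 acc (1+(i:Int)) (1+(m:Int)) v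
        = (pvTab weights st i).set (i+1) (pvPart weights st i (m+1)) := by
    intro v hv
    unfold pvSet2
    rw [hrowcur]
    have h1 : (1+(i:Int)) = (((i+1) : Nat) : Int) := by push_cast; omega
    have h2 : (1+(m:Int)) = (((m+1) : Nat) : Int) := by push_cast; omega
    rw [h1, h2, PySem.List.pySetD_natCast, PySem.List.pySetD_natCast, hacc, List.set_set]
    rw [hv]
    rw [pvPart_set weights st i m hm]
  simp only [hgetw]
  have hstep : pvRow (weights.take (i+1)) ((m:Int)+1)
      = pvStep (pvRow (weights.take i)) weights[i] ((m:Int)+1) := by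
    rw [pvRow_take_succ weights i hi]
  split_ifs with hlt
  · apply hwrite
    rw [hstep]
    unfold pvStep
    rw [if_pos (by omega)]
    rw [hread (1+(m:Int)) (by omega) (by omega)]
    congr 1
    omega
  · apply hwrite
    rw [hstep]
    unfold pvStep
    rw [if_neg (by omega)]
    rw [hread (1+(m:Int)) (by omega) (by omega),
        hread (1+(m:Int) - weights[i]) (by omega) (by omega)]
    have e1 : (1+(m:Int)) = ((m:Int)+1) := by ring
    rw [e1]

def pvBody (weights : List Int) (iv : Int) (dp : List (List Int)) (j : Int) : List (List Int) :=
  let w := PySem.List.pyGetD weights (iv - 1) 0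
  if j < w then pvSet2 dp iv j (pvGet2 dp (iv - 1) j)
  else pvSet2 dp iv j (max (pvGet2 dp (iv - 1) (j - w) + w) (pvGet2 dp (iv - 1) j))

lemma inner_step' (weights : List Int) (st : Nat) (hw : ∀ w ∈ weights, 0 ≤ w)
    (i m : Nat) (hi : i < weights.length) (hm : m < st) :
    pvBody weights (1+(i:Int)) ((pvTab weights st i).set (i+1) (pvPart weights st i m)) (1+(m:Int))
      = (pvTab weights st i).set (i+1) (pvPart weights st i (m+1)) :=
  inner_step weights st hw i m hi hm

lemma inner_fold (weights : List Int) (st : Nat) (hw : ∀ w ∈ weights, 0 ≤ w)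
    (i : Nat) (hi : i < weights.length) : ∀ m, m ≤ st →
    (List.range m).foldl (fun dp (k : Nat) => pvBody weights (1+(i:Int)) dp (1+(k:Int))) (pvTab weights st i)
      = (pvTab weights st i).set (i+1) (pvPart weights st i m) := by
  intro m
  induction m with
  | zero =>
    intro _
    rw [List.range_zero, List.foldl_nil, pvPart_zero, set_pvZeros_self weights st i hi]
  | succ m ih =>
    intro hm
    rw [List.range_succ, List.foldl_append, List.foldl_cons, List.foldl_nil, ih (by omega)]
    exact inner_step' weights st hw i m hi (by omega)

lemma pvPart_full (weights : List Int) (st : Nat) (hw : ∀ w ∈ weights, 0 ≤ w)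
    (i : Nat) : pvPart weights st i st = pvRowL (weights.take (i+1)) st := by
  have hw' : ∀ w ∈ weights.take (i+1), 0 ≤ w := fun w hwm => hw w (List.mem_of_mem_take hwm)
  apply List.ext_getElem
  · rw [length_pvPart, length_pvRowL]
  · intro k hk1 hk2
    rw [length_pvPart] at hk1
    rw [getElem_pvPart weights st i st k hk1, getElem_pvRowL _ _ _ hk1]
    by_cases h : 1 ≤ (k:Int) ∧ (k:Int) ≤ (st:Int)
    · rw [if_pos h]
    · rw [if_neg h]
      have hk0 : k = 0 := by omega
      subst hk0
      exact (pvRow_zero_aux (weights.take (i+1)) (fun _ => 0) hw' rfl).symm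

lemma set_row_full (weights : List Int) (st i : Nat) (hi : i < weights.length) :
    (pvTab weights st i).set (i+1) (pvRowL (weights.take (i+1)) st) = pvTab weights st (i+1) := by
  apply List.ext_getElem
  · rw [List.length_set, length_pvTab, length_pvTab]
  · intro k hk1 hk2
    rw [List.length_set, length_pvTab] at hk1
    rw [List.getElem_set, pvTab_getElem weights st (i+1) k hk1]
    by_cases h : k = i+1
    · subst h
      rw [if_pos rfl, if_pos (by omega)]
    · rw [if_neg (by omega : ¬ i + 1 = k), pvTab_getElem weights st i k hk1]
      by_cases h2 : k ≤ i
      · rw [if_pos h2, if_pos (by omega)]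
      · rw [if_neg h2, if_neg (by omega)]

lemma outer_step (weights : List Int) (st : Nat) (hw : ∀ w ∈ weights, 0 ≤ w)
    (i : Nat) (hi : i < weights.length) :
    (PySem.List.pyRange 1 ((st:Int)+1) 1).foldl (fun dp j => pvBody weights (1+(i:Int)) dp j)
      (pvTab weights st i) = pvTab weights st (i+1) := by
  have h1 : (PySem.List.pyRange 1 ((st:Int)+1) 1)
      = (List.range st).map (fun k : Nat => (1:Int) + k) := by
    have hst : ((st:Int)+1-1).toNat = st := by omega
    rw [PySem.List.pyRange_one, hst]
  rw [h1, List.foldl_map]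
  have h2 := inner_fold weights st hw i hi st le_rfl
  rw [h2, pvPart_full weights st hw i, set_row_full weights st i hi]

lemma dp0_eq (weights : List Int) (st : Nat) :
    (PySem.List.pyRange 0 ((weights.length:Int)+1) 1).map
      (fun _ => List.replicate (((st:Int)+1)).toNat (0:Int)) = pvTab weights st 0 := by
  apply List.ext_getElem
  · rw [List.length_map, PySem.List.length_pyRange_one, length_pvTab]
    omega
  · intro k hk1 hk2
    rw [length_pvTab] at hk2
    rw [List.getElem_map, pvTab_getElem weights st 0 k hk2]
    have h1 : ((st:Int)+1).toNat = st + 1 := by omega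
    by_cases h : k ≤ 0
    · have : k = 0 := by omega
      subst this
      rw [if_pos le_rfl, List.take_zero, pvRowL_nil, h1]
      rfl
    · rw [if_neg h, h1]
      rfl

lemma outer_fold (weights : List Int) (st : Nat) (hw : ∀ w ∈ weights, 0 ≤ w) :
    ∀ M, M ≤ weights.length →
    (List.range M).foldl
      (fun (dp : List (List Int)) (k : Nat) =>
        (PySem.List.pyRange 1 ((st:Int)+1) 1).foldl
          (fun dp j =>
            let w := PySem.List.pyGetD weights ((1+(k:Int)) - 1) 0
            if j < w then pvSet2 dp (1+(k:Int)) j (pvGet2 dp ((1+(k:Int)) - 1) j)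
            else pvSet2 dp (1+(k:Int)) j
              (max (pvGet2 dp ((1+(k:Int)) - 1) (j - w) + w) (pvGet2 dp ((1+(k:Int)) - 1) j))) dp)
      (pvTab weights st 0) = pvTab weights st M := by
  intro M
  induction M with
  | zero => intro _; rw [List.range_zero, List.foldl_nil]
  | succ M ih =>
    intro hM
    rw [List.range_succ, List.foldl_append, List.foldl_cons, List.foldl_nil, ih (by omega)]
    exact outer_step weights st hw M (by omega)

lemma final_read (weights : List Int) (st : Nat) :
    pvGet2 (pvTab weights st weights.length) (-1) (-1) = pvRow weights (st:Int) := by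
  unfold pvGet2
  have hne : pvTab weights st weights.length ≠ [] := by
    intro h
    have := length_pvTab weights st weights.length
    rw [h] at this
    simp at this
  rw [PySem.List.pyGetD_neg_one _ _ hne, List.getLast_eq_getElem]
  have hidx : (pvTab weights st weights.length).length - 1 = weights.length := by
    rw [length_pvTab]
    omega
  have h2 : (pvTab weights st weights.length)[(pvTab weights st weights.length).length - 1]'(by
      rw [length_pvTab]; omega) = pvRowL weights st := by
    have := pvTab_getElem weights st weights.length weights.length (by omega)
    rw [if_pos le_rfl, List.take_length] at this
    rw [← this]
    congr 1
  rw [h2]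
  have hne2 : pvRowL weights st ≠ [] := by
    intro h
    have := length_pvRowL weights st
    rw [h] at this
    simp at this
  rw [PySem.List.pyGetD_neg_one _ _ hne2, List.getLast_eq_getElem]
  have h3 : (pvRowL weights st).length - 1 = st := by rw [length_pvRowL]; omega
  have h4 : (pvRowL weights st)[(pvRowL weights st).length - 1]'(by rw [length_pvRowL]; omega)
      = pvRow weights (st:Int) := by
    have := getElem_pvRowL weights st st (by omega)
    rw [← this]
    congr 1
  rw [h4]

lemma pack_one_eq_row (weights : List Int) (size : Int) (h0 : 0 ≤ size)
    (hw : ∀ w ∈ weights, 0 ≤ w) : pack_one weights size = pvRow weights size := by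
  lift size to Nat using h0 with st
  unfold pack_one
  dsimp only
  rw [dp0_eq weights st]
  have hlen : (((weights.length:Int)+1) - 1).toNat = weights.length := by omega
  rw [PySem.List.pyRange_one 1 ((weights.length:Int)+1), hlen, List.foldl_map]
  rw [outer_fold weights st hw weights.length le_rfl]
  exact final_read weights st

-- ===== VERDICT (by name: the statement is the Claim_ definition above) =====
theorem pack_one_spec : Claim_equal_pack_one := by
  intro weights size _ hpre
  obtain ⟨h0, hcase⟩ := hpre
  unfold Spec_pack_one
  rcases hcase with hz | hw
  · subst hz; rw [pack_one_size_zero, alt_size_zero]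
  · rw [pack_one_eq_row weights size h0 hw, alt_eq_row weights size h0 hw]
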